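-- pv_equiv track=rewrite | github.com/PaddlePaddle/PaddleHub | modules/text/machine_translation/transformer/en-de/utils.py | post_process_seq
-- ===== SOURCE A (Python) =====
-- def post_process_seq(seq, bos_idx, eos_idx, output_bos=False, output_eos=False):
--     """
--     Post-process the decoded sequence.
--     """
--     eos_pos = len(seq) - 1
--     for i, idx in enumerate(seq):
--         if idx == eos_idx:
--             eos_pos = i
--             break
--     seq = [int(idx) for idx in seq[:eos_pos + 1] if (output_bos or idx != bos_idx) and (output_eos or idx != eos_idx)]
--     return seq
-- ===== SOURCE B (Python) =====
-- def post_process_seq(seq, bos_idx, eos_idx, output_bos=False, output_eos=False):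
--     """Single pass: filter while scanning, stop at the first eos."""
--     out = []
--     for idx in seq:
--         if idx == eos_idx:
--             if output_eos and (output_bos or idx != bos_idx):
--                 out.append(int(idx))
--             break
--         if idx == bos_idx and not output_bos:
--             continue
--         out.append(int(idx))
--     return out
-- ===== Notes on version B (the rewrite author's own statement) =====
-- stated objective: simpler
-- what changed: Replaces the two-pass structure (enumerate to find the first eos, then slice + filtering comprehension) with one loop that filters while scanning and breaks at the first eos.
import Mathlib
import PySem

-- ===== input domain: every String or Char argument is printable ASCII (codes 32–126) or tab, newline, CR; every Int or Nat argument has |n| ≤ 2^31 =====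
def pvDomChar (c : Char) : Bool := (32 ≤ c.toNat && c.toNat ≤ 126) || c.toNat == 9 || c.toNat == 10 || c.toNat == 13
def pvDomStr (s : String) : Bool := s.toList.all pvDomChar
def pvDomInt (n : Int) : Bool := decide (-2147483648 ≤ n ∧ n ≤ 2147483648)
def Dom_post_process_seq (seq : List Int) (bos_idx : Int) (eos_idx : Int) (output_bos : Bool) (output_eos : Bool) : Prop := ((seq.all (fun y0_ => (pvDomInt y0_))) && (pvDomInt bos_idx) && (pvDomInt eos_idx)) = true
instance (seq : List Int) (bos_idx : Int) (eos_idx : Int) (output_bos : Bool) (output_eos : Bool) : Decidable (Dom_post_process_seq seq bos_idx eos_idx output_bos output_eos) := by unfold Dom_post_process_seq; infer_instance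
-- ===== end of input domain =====

-- B replaces A's two passes (find first eos, then slice + comprehension) by one
-- filtering scan that breaks at the first eos; objective: simpler.

-- ===== PORT A =====
-- A's enumerate-loop that finds the index of the first eos (None if absent).
def pvFindEos (eos : Int) : List Int → Option Nat
  | [] => none
  | x :: rest => if x = eos then some 0 else (pvFindEos eos rest).map (· + 1)

def post_process_seq (seq : List Int) (bos_idx : Int) (eos_idx : Int) (output_bos : Bool) (output_eos : Bool) : List Int :=
  let eos_pos : Int :=
    match pvFindEos eos_idx seq with
    | some i => (i : Int)
    | none => (seq.length : Int) - 1
  (PySem.List.slice seq none (some (eos_pos + 1))).filter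
    (fun idx => (output_bos || decide (idx ≠ bos_idx)) && (output_eos || decide (idx ≠ eos_idx)))

-- ===== PORT B =====
-- B's single loop: filter while scanning, stop at the first eos.
def pvScan (bos eos : Int) (ob oe : Bool) : List Int → List Int
  | [] => []
  | x :: rest =>
    if x = eos then (if oe && (ob || decide (x ≠ bos)) then [x] else [])
    else if x = bos && !ob then pvScan bos eos ob oe rest
    else x :: pvScan bos eos ob oe rest

def post_process_seq_alt (seq : List Int) (bos_idx : Int) (eos_idx : Int) (output_bos : Bool) (output_eos : Bool) : List Int :=
  pvScan bos_idx eos_idx output_bos output_eos seq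

-- ===== PRECONDITION & SPEC =====
def Spec_post_process_seq (seq : List Int) (bos_idx : Int) (eos_idx : Int) (output_bos : Bool) (output_eos : Bool) (out : List Int) : Prop := out = post_process_seq_alt seq bos_idx eos_idx output_bos output_eos
instance (seq : List Int) (bos_idx : Int) (eos_idx : Int) (output_bos : Bool) (output_eos : Bool) (out : List Int) : Decidable (Spec_post_process_seq seq bos_idx eos_idx output_bos output_eos out) := by unfold Spec_post_process_seq; infer_instance

-- ===== CLAIM (what is proved, stated in full; the proofs are below) =====
def Claim_equal_post_process_seq : Prop := ∀ (seq : List Int) (bos_idx : Int) (eos_idx : Int) (output_bos : Bool) (output_eos : Bool), Dom_post_process_seq seq bos_idx eos_idx output_bos output_eos → Spec_post_process_seq seq bos_idx eos_idx output_bos output_eos (post_process_seq seq bos_idx eos_idx output_bos output_eos)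

-- ===== LEMMAS AND PROOFS =====

theorem post_process_seq_eq_alt (bos eos : Int) (ob oe : Bool) :
    ∀ seq, post_process_seq seq bos eos ob oe = post_process_seq_alt seq bos eos ob oe := by
  intro seq
  induction seq with
  | nil =>
    simp [post_process_seq, post_process_seq_alt, pvFindEos, pvScan, PySem.List.slice]
  | cons x rest ih =>
    by_cases hx : x = eos
    · subst hx
      simp only [post_process_seq, post_process_seq_alt, pvFindEos, pvScan, if_true]
      rw [PySem.List.slice_to _ (by omega : (0:Int) ≤ ((0:Nat):Int) + 1)]
      by_cases hb : x = bos
      · subst hb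
        cases oe <;> cases ob <;> simp [List.filter]
      · cases oe <;> cases ob <;> simp [hb, List.filter]
    · have hA : post_process_seq (x :: rest) bos eos ob oe =
          (if (ob || decide (x ≠ bos)) && (oe || decide (x ≠ eos)) then [x] else []) ++
            post_process_seq rest bos eos ob oe := by
        cases hfind : pvFindEos eos rest with
        | none =>
          have h1 : PySem.List.slice (x :: rest) none (some (((x :: rest).length : Int) - 1 + 1)) = x :: rest := by
            rw [show ((x :: rest).length : Int) - 1 + 1 = (((x :: rest).length : Nat) : Int) by ring]
            rw [PySem.List.slice_to_natCast]
            simp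
          have h2 : PySem.List.slice rest none (some ((rest.length : Int) - 1 + 1)) = rest := by
            rw [show (rest.length : Int) - 1 + 1 = ((rest.length : Nat) : Int) by ring]
            rw [PySem.List.slice_to_natCast]
            simp
          simp only [post_process_seq, pvFindEos, if_neg hx, hfind, Option.map_none, h1, h2]
          rw [List.filter_cons]
          split <;> simp
        | some i =>
          have h1 : PySem.List.slice (x :: rest) none (some (((i + 1 : Nat) : Int) + 1)) = x :: rest.take (i + 1) := by
            rw [show ((i + 1 : Nat) : Int) + 1 = ((i + 2 : Nat) : Int) by push_cast; ring]
            rw [PySem.List.slice_to_natCast]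
            simp
          have h2 : PySem.List.slice rest none (some (((i : Nat) : Int) + 1)) = rest.take (i + 1) := by
            rw [show ((i : Nat) : Int) + 1 = ((i + 1 : Nat) : Int) by push_cast; ring]
            rw [PySem.List.slice_to_natCast]
          simp only [post_process_seq, pvFindEos, if_neg hx, hfind, Option.map_some, h1, h2]
          rw [List.filter_cons]
          split <;> simp
      rw [hA, ih]
      simp only [post_process_seq_alt, pvScan, if_neg hx]
      by_cases hb : x = bos
      · subst hb
        cases ob <;> simp [hx]
      · cases ob <;> simp [hb, hx]

-- ===== VERDICT (by name: the statement is the Claim_ definition above) =====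
theorem post_process_seq_spec : Claim_equal_post_process_seq := by
  intro seq bos eos ob oe _
  unfold Spec_post_process_seq
  exact post_process_seq_eq_alt bos eos ob oe seq
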